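-- pv_equiv track=rewrite | github.com/devlucashenry/IC | lista_3_python/questao4.py | lstDiv
-- ===== SOURCE A (Python) =====
-- def lstDiv(n, xs):
-- 	if not xs:
-- 		return []
-- 	else:
-- 		x = xs[0]
-- 		if n % x == 0:
-- 			return [x] + lstDiv(n, xs[1:])
-- 		else:
-- 			return lstDiv(n, xs[1:])
-- ===== SOURCE B (Python) =====
-- def lstDiv(n, xs):
--     result = []
--     for x in xs:
--         if n % x == 0:
--             result.append(x)
--     return result
-- ===== Notes on version B (the rewrite author's own statement) =====
-- stated objective: faster
-- what changed: Replaces A's tail recursion with repeated list concatenation [x] + lstDiv(...) by a single iterative loop appending matching elements to an accumulator.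
import Mathlib
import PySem

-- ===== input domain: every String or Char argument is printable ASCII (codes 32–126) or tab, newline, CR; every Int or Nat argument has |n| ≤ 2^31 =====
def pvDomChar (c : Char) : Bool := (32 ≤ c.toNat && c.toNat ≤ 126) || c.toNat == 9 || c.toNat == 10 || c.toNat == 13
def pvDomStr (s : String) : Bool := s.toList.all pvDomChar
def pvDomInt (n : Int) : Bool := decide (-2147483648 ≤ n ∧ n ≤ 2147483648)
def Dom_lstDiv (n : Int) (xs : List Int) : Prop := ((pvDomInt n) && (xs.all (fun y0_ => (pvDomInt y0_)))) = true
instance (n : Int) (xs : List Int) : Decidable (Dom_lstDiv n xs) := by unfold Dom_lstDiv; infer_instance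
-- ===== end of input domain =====

-- B replaces A's tail recursion with repeated list concatenation by an iterative accumulating loop (objective: faster; O(n) vs A's O(n^2) copying).


-- ===== PORT A =====
def lstDiv (n : Int) (xs : List Int) : List Int :=
  match xs with
  | [] => []
  | x :: rest =>
    if PySem.Int.mod n x = 0 then
      [x] ++ lstDiv n rest
    else
      lstDiv n rest

-- ===== PORT B =====
def lstDiv_alt (n : Int) (xs : List Int) : List Int :=
  xs.foldl (fun result x => if PySem.Int.mod n x = 0 then result ++ [x] else result) []

-- ===== PRECONDITION & SPEC =====
-- Pre_ excludes lists containing 0: there the Python A (and B) raises ZeroDivisionError at 'n % x'.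
def Pre_lstDiv (n : Int) (xs : List Int) : Prop := (0 : Int) ∉ xs
instance (n : Int) (xs : List Int) : Decidable (Pre_lstDiv n xs) := by unfold Pre_lstDiv; infer_instance
def pvWitness_lstDiv : Int × List Int := (12, [1, 2, 5, 6])

def Spec_lstDiv (n : Int) (xs : List Int) (out : List Int) : Prop := out = lstDiv_alt n xs
instance (n : Int) (xs : List Int) (out : List Int) : Decidable (Spec_lstDiv n xs out) := by unfold Spec_lstDiv; infer_instance

-- ===== CLAIM (what is proved, stated in full; the proofs are below) =====
def Claim_equal_lstDiv : Prop := ∀ (n : Int) (xs : List Int), Dom_lstDiv n xs → Pre_lstDiv n xs → Spec_lstDiv n xs (lstDiv n xs)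

-- ===== LEMMAS AND PROOFS =====
theorem lstDiv_alt_acc (n : Int) (xs : List Int) (acc : List Int) :
    xs.foldl (fun result x => if PySem.Int.mod n x = 0 then result ++ [x] else result) acc
      = acc ++ lstDiv n xs := by
  induction xs generalizing acc with
  | nil => simp [lstDiv]
  | cons x rest ih =>
    simp only [List.foldl_cons, lstDiv]
    by_cases h : PySem.Int.mod n x = 0 <;> simp [h, ih]

-- ===== VERDICT (by name: the statement is the Claim_ definition above) =====
theorem lstDiv_spec : Claim_equal_lstDiv := by
  intro n xs _ _
  unfold Spec_lstDiv lstDiv_alt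
  simp [lstDiv_alt_acc]
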